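-- pv_equiv track=rewrite | github.com/tinystork/zemosaic | zemosaic_align_stack.py | _generate_winsor_chunk_indices
-- ===== SOURCE A (Python) =====
-- import math
-- from typing import Optional, Callable, Any, Iterable, Sequence
--
-- def _generate_winsor_chunk_indices(
--     total_frames: int,
--     chunk_size: int,
--     strategy: str,
-- ) -> Iterable[list[int]]:
--     """Yield index groups respecting the requested split strategy."""
--
--     if total_frames <= 0:
--         return []
--     chunk_size = max(1, int(chunk_size))
--     strategy_norm = str(strategy or "sequential").lower()
--
--     if strategy_norm == "roundrobin" and chunk_size < total_frames:
--         chunk_count = max(1, math.ceil(total_frames / chunk_size))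
--         return [
--             list(range(offset, total_frames, chunk_count))
--             for offset in range(chunk_count)
--         ]
--
--     return [
--         list(range(start, min(total_frames, start + chunk_size)))
--         for start in range(0, total_frames, chunk_size)
--     ]
-- ===== SOURCE B (Python) =====
-- def _generate_winsor_chunk_indices(total_frames, chunk_size, strategy):
--     """Single-pass scatter: preallocate all chunk buckets, pick the bucket-key
--     function once, then assign each frame index i to its bucket in one loop."""
--     if total_frames <= 0:
--         return []
--     cs = max(1, int(chunk_size))
--     norm = str(strategy or "sequential").lower()
--     nchunks = -(-total_frames // cs)  # ceil(total_frames / cs)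
--     if norm == "roundrobin" and cs < total_frames:
--         key = lambda i: i % nchunks
--     else:
--         key = lambda i: i // cs
--     buckets = [[] for _ in range(nchunks)]
--     for i in range(total_frames):
--         buckets[key(i)].append(i)
--     return buckets
-- ===== Notes on version B (the rewrite author's own statement) =====
-- stated objective: alternative
-- what changed: Replaces A's per-chunk nested range generation (a list comprehension building each group with its own range) by a one-pass scatter: compute the chunk count once, preallocate the buckets, and route each frame index i to bucket i % nchunks (round-robin) or i // chunk_size (sequential) in a single loop.
import Mathlib
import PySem

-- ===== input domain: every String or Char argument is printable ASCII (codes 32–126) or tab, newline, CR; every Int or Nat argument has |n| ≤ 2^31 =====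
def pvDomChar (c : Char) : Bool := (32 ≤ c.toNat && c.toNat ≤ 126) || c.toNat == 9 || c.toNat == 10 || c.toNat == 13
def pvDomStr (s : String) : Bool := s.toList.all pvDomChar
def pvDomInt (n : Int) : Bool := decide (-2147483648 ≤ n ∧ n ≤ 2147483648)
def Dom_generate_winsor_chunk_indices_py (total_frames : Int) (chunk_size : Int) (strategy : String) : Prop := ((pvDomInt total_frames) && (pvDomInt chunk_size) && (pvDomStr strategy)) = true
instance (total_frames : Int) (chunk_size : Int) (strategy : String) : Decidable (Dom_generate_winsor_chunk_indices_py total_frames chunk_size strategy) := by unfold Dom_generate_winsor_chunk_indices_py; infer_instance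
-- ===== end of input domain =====

-- B replaces A's per-chunk range comprehensions by a single-pass scatter of each
-- frame index into preallocated buckets (alternative decomposition, same cost).

-- ===== PORT A =====
def generate_winsor_chunk_indices_py (total_frames : Int) (chunk_size : Int) (strategy : String) : List (List Int) :=
  if total_frames ≤ 0 then []
  else
    let cs := max 1 chunk_size
    let strategy_norm := PySem.Str.lower (if strategy = "" then "sequential" else strategy)
    if strategy_norm = "roundrobin" ∧ cs < total_frames then
      -- math.ceil(total_frames / cs): exact integer ceiling (exact on the |n| ≤ 2^31 domain)
      let chunk_count := max 1 (-(PySem.Int.floordiv (-total_frames) cs))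
      (PySem.List.pyRange 0 chunk_count 1).map
        (fun offset => PySem.List.pyRange offset total_frames chunk_count)
    else
      (PySem.List.pyRange 0 total_frames cs).map
        (fun start => PySem.List.pyRange start (min total_frames (start + cs)) 1)

-- ===== PORT B =====
-- the scatter loop of Source B: for i in xs: buckets[key(i)] = buckets[key(i)] + [i]
def pvScatter (xs : List Int) (key : Int → Int) (buckets : List (List Int)) : List (List Int) :=
  xs.foldl (fun bs i =>
    PySem.List.pySetD bs (key i) (PySem.List.pyGetD bs (key i) [] ++ [i])) buckets

def generate_winsor_chunk_indices_py_alt (total_frames : Int) (chunk_size : Int) (strategy : String) : List (List Int) :=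
  if total_frames ≤ 0 then []
  else
    let cs := max 1 chunk_size
    let norm := PySem.Str.lower (if strategy = "" then "sequential" else strategy)
    let nchunks := -(PySem.Int.floordiv (-total_frames) cs)
    let key : Int → Int :=
      if norm = "roundrobin" ∧ cs < total_frames then
        fun i => PySem.Int.mod i nchunks
      else
        fun i => PySem.Int.floordiv i cs
    pvScatter (PySem.List.pyRange 0 total_frames 1) key (List.replicate nchunks.toNat [])

-- ===== PRECONDITION & SPEC =====
def Spec_generate_winsor_chunk_indices_py (total_frames : Int) (chunk_size : Int) (strategy : String) (out : List (List Int)) : Prop := out = generate_winsor_chunk_indices_py_alt total_frames chunk_size strategy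
instance (total_frames : Int) (chunk_size : Int) (strategy : String) (out : List (List Int)) : Decidable (Spec_generate_winsor_chunk_indices_py total_frames chunk_size strategy out) := by unfold Spec_generate_winsor_chunk_indices_py; infer_instance

-- ===== CLAIM (what is proved, stated in full; the proofs are below) =====
def Claim_equal_generate_winsor_chunk_indices_py : Prop := ∀ (total_frames : Int) (chunk_size : Int) (strategy : String), Dom_generate_winsor_chunk_indices_py total_frames chunk_size strategy → Spec_generate_winsor_chunk_indices_py total_frames chunk_size strategy (generate_winsor_chunk_indices_py total_frames chunk_size strategy)

-- ===== LEMMAS AND PROOFS =====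

-- ceil(t/cs) written Python-style as -(-t // cs), characterised via Euclidean division
lemma pv_neg_fdiv_neg (t cs : Int) (hcs : 0 < cs) :
    -(PySem.Int.floordiv (-t) cs) = (t + cs - 1) / cs := by
  have hfd : PySem.Int.floordiv (-t) cs = (-t) / cs := by
    simp [PySem.Int.floordiv, Int.fdiv_eq_ediv, le_of_lt hcs]
  rw [hfd]
  have h1 := Int.ediv_add_emod (-t) cs
  have h2 := Int.emod_nonneg (-t) (ne_of_gt hcs)
  have h3 := Int.emod_lt_of_pos (-t) hcs
  set q := (-t) / cs with hq
  set r := (-t) % cs with hr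
  have ht : t + cs - 1 = (cs - 1 - r) + cs * (-q) := by linarith
  rw [ht, Int.add_mul_ediv_left _ _ (ne_of_gt hcs),
      Int.ediv_eq_zero_of_lt (by omega) (by omega)]
  ring

-- two strictly increasing integer lists with the same members are equal
lemma pv_eq_of_pairwise_lt {xs ys : List Int}
    (hx : xs.Pairwise (· < ·)) (hy : ys.Pairwise (· < ·))
    (h : ∀ a, a ∈ xs ↔ a ∈ ys) : xs = ys := by
  refine List.eq_of_perm_of_sorted (fun a b _ _ hab hba => absurd hab (not_lt.mpr hba.le)) hx hy ?_
  exact (List.perm_ext_iff_of_nodup (hx.imp ne_of_lt) (hy.imp ne_of_lt)).mpr h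

lemma pv_pairwise_lt_pyRange_pos (a b s : Int) (hs : 0 < s) :
    (PySem.List.pyRange a b s).Pairwise (· < ·) := by
  rw [PySem.List.pyRange_of_pos _ _ hs, List.pairwise_map]
  exact (List.pairwise_lt_range).imp (fun {i j} hij => by
    have : (i : Int) < (j : Int) := by exact_mod_cast hij
    nlinarith)

-- a round-robin arm of A's comprehension is exactly the filter the scatter produces
lemma pv_rr_inner (t C j : Int) (hC : 0 < C) (hj0 : 0 ≤ j) (hjC : j < C) :
    PySem.List.pyRange j t C
      = (PySem.List.pyRange 0 t 1).filter (fun i => PySem.Int.mod i C = j) := by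
  refine pv_eq_of_pairwise_lt (pv_pairwise_lt_pyRange_pos _ _ _ hC)
    ((PySem.List.pairwise_lt_pyRange_one 0 t).filter _) (fun a => ?_)
  rw [List.mem_filter, PySem.List.mem_pyRange_iff_of_pos hC, PySem.List.mem_pyRange_one]
  have hmod : PySem.Int.mod a C = a % C := by
    simp [PySem.Int.mod, Int.fmod_eq_emod, le_of_lt hC]
  simp only [hmod, decide_eq_true_eq]
  constructor
  · rintro ⟨hja, hat, hdvd⟩
    refine ⟨⟨le_trans hj0 hja, hat⟩, ?_⟩
    have : a % C = j % C := by
      rw [Int.emod_eq_emod_iff_emod_sub_eq_zero]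
      exact Int.emod_eq_zero_of_dvd hdvd
    rwa [Int.emod_eq_of_lt hj0 hjC] at this
  · rintro ⟨⟨ha0, hat⟩, hmj⟩
    have hq0 : 0 ≤ a / C := Int.ediv_nonneg ha0 (le_of_lt hC)
    have hdm := Int.ediv_add_emod a C
    have hja : j ≤ a := by nlinarith
    refine ⟨hja, hat, ⟨a / C, by linarith⟩⟩

-- a sequential arm of A's comprehension is exactly the filter the scatter produces
lemma pv_seq_inner (t cs : Int) (k : Nat) (hcs : 0 < cs) :
    PySem.List.pyRange (cs * (k : Int)) (min t (cs * (k : Int) + cs)) 1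
      = (PySem.List.pyRange 0 t 1).filter (fun i => PySem.Int.floordiv i cs = (k : Int)) := by
  refine pv_eq_of_pairwise_lt (PySem.List.pairwise_lt_pyRange_one _ _)
    ((PySem.List.pairwise_lt_pyRange_one 0 t).filter _) (fun a => ?_)
  rw [List.mem_filter, PySem.List.mem_pyRange_one, PySem.List.mem_pyRange_one]
  have hfd : PySem.Int.floordiv a cs = a / cs := by
    simp [PySem.Int.floordiv, Int.fdiv_eq_ediv, le_of_lt hcs]
  simp only [hfd, decide_eq_true_eq, lt_min_iff]
  have hk0 : (0 : Int) ≤ cs * (k : Int) := mul_nonneg (le_of_lt hcs) (by positivity)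
  constructor
  · rintro ⟨hka, hat, hab⟩
    refine ⟨⟨le_trans hk0 hka, hat⟩, ?_⟩
    have ha : a = (a - cs * (k : Int)) + cs * (k : Int) := by ring
    rw [ha, Int.add_mul_ediv_left _ _ (ne_of_gt hcs),
        Int.ediv_eq_zero_of_lt (by omega) (by omega)]
    ring
  · rintro ⟨⟨ha0, hat⟩, hdk⟩
    have hdm := Int.ediv_add_emod a cs
    have h2 := Int.emod_nonneg a (ne_of_gt hcs)
    have h3 := Int.emod_lt_of_pos a hcs
    rw [hdk] at hdm
    exact ⟨by linarith, hat, by linarith⟩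

-- the scatter loop builds exactly "bucket j gets the inputs with key = j, in order"
lemma pv_pvScatter_eq (key : Int → Int) (xs : List Int) :
    ∀ (bs : List (List Int)),
      (∀ x ∈ xs, 0 ≤ key x ∧ (key x).toNat < bs.length) →
      pvScatter xs key bs
        = (List.range bs.length).map
            (fun j => bs.getD j [] ++ xs.filter (fun i => key i = (j : Int))) := by
  induction xs with
  | nil =>
    intro bs _
    simp only [pvScatter, List.foldl_nil, List.filter_nil, List.append_nil]
    apply List.ext_getElem (by simp)
    intro i h1 h2
    simp only [List.getElem_map, List.getElem_range]
    rw [List.getD_eq_getElem?_getD, List.getElem?_eq_getElem (by simpa using h2)]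
    simp
  | cons x xs ih =>
    intro bs h
    have hx := h x (List.mem_cons_self)
    have hstep : pvScatter (x :: xs) key bs
        = pvScatter xs key (bs.set (key x).toNat (bs.getD (key x).toNat [] ++ [x])) := by
      simp [pvScatter, List.foldl_cons, PySem.List.pySetD_of_nonneg _ _ hx.1,
        PySem.List.pyGetD_of_nonneg _ _ hx.1]
    rw [hstep, ih _ (fun y hy => by simpa using h y (List.mem_cons_of_mem _ hy))]
    rw [List.length_set]
    refine List.map_congr_left (fun j hj => ?_)
    have hjlen : j < bs.length := List.mem_range.mp hj
    by_cases hjx : (key x).toNat = j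
    · have hkx : key x = (j : Int) := by omega
      rw [List.getD_eq_getElem?_getD, hjx, List.getElem?_set_self (by omega)]
      simp [List.filter_cons, hkx, List.getD_eq_getElem?_getD,
        List.getElem?_eq_getElem hjlen, List.append_assoc]
    · have hkx : ¬ (key x = (j : Int)) := by omega
      rw [List.getD_eq_getElem?_getD, List.getElem?_set_ne (by omega)]
      simp [List.filter_cons, hkx, List.getD_eq_getElem?_getD]

-- every element of the preallocated bucket list is []
lemma pv_getD_replicate_nil (m j : Nat) :
    (List.replicate m ([] : List Int)).getD j [] = [] := by
  rw [List.getD_eq_getElem?_getD, List.getElem?_replicate]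
  by_cases h : j < m <;> simp [h]

-- ===== VERDICT (by name: the statement is the Claim_ definition above) =====
theorem generate_winsor_chunk_indices_py_spec : Claim_equal_generate_winsor_chunk_indices_py := by
  intro t c s _
  unfold Spec_generate_winsor_chunk_indices_py generate_winsor_chunk_indices_py
    generate_winsor_chunk_indices_py_alt
  by_cases h0 : t ≤ 0
  · simp [h0]
  · simp only [if_neg h0]
    have ht : 0 < t := by omega
    set cs := max 1 c with hcsdef
    have hcs : 0 < cs := by omega
    set norm := PySem.Str.lower (if s = "" then "sequential" else s) with hnorm
    set nch := -(PySem.Int.floordiv (-t) cs) with hnchdef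
    have hnch : nch = (t + cs - 1) / cs := pv_neg_fdiv_neg t cs hcs
    have hq0 : 0 ≤ (t + cs - 1) % cs := Int.emod_nonneg _ (ne_of_gt hcs)
    have hq1 : (t + cs - 1) % cs < cs := Int.emod_lt_of_pos _ hcs
    have hdm := Int.ediv_add_emod (t + cs - 1) cs
    have hnch1 : 1 ≤ nch := by nlinarith [hnch]
    have htle : t ≤ cs * nch := by nlinarith [hnch]
    have hncht : nch ≤ t := by nlinarith [hnch]
    by_cases hb : norm = "roundrobin" ∧ cs < t
    · -- round-robin branch
      simp only [if_pos hb]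
      have hcc : max 1 nch = nch := max_eq_right hnch1
      rw [hcc]
      rw [pv_pvScatter_eq _ _ _ (fun x hx => by
        rw [PySem.List.mem_pyRange_one] at hx
        have hmod : PySem.Int.mod x nch = x % nch := by
          simp [PySem.Int.mod, Int.fmod_eq_emod, (show (0:Int) ≤ nch by omega)]
        have h1 : 0 ≤ x % nch := Int.emod_nonneg _ (by omega)
        have h2 : x % nch < nch := Int.emod_lt_of_pos _ (by omega)
        rw [hmod]
        constructor
        · exact h1
        · rw [List.length_replicate]; omega)]
      rw [List.length_replicate, PySem.List.pyRange_one, List.map_map]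
      simp only [sub_zero]
      refine List.map_congr_left (fun k hk => ?_)
      have hk' : (k : Int) < nch := by
        have := List.mem_range.mp hk; omega
      simp only [Function.comp_apply, pv_getD_replicate_nil, List.nil_append]
      have := pv_rr_inner t nch (k : Int) (by omega) (by positivity) hk'
      simpa using this
    · -- sequential branch
      simp only [if_neg hb]
      rw [pv_pvScatter_eq _ _ _ (fun x hx => by
        rw [PySem.List.mem_pyRange_one] at hx
        have hfd : PySem.Int.floordiv x cs = x / cs := by
          simp [PySem.Int.floordiv, Int.fdiv_eq_ediv, le_of_lt hcs]
        rw [hfd]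
        constructor
        · exact Int.ediv_nonneg hx.1 (le_of_lt hcs)
        · rw [List.length_replicate]
          have : x / cs < nch := (Int.ediv_lt_iff_lt_mul hcs).mpr (by nlinarith [hx.2])
          have h0' : 0 ≤ x / cs := Int.ediv_nonneg hx.1 (le_of_lt hcs)
          omega)]
      rw [List.length_replicate,
          PySem.List.pyRange_of_pos 0 t hcs, List.map_map, if_pos ht]
      have hcount : ((t - 0 + cs - 1) / cs).toNat = nch.toNat := by
        rw [hnch]; norm_num
      rw [hcount]
      refine List.map_congr_left (fun k hk => ?_)
      simp only [Function.comp_apply, pv_getD_replicate_nil, List.nil_append, zero_add]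
      exact pv_seq_inner t cs k hcs
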